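-- pv_equiv track=rewrite | github.com/grawies/aoc2024 | day13/solve.py | diophantine
-- ===== SOURCE A (Python) =====
-- def euclid(a, b, c):
--     """Solves ax + by = c, diophantine.
--
--     Requires a >= b.
--     Requires gcd(a,b) | c.
--     """
--     if b == 0:
--         return c // a, 0
--
--     q = a // b
--     r = a - b * q
--     x0, y0 = euclid(b, r, c)
--     return y0, x0 - q * y0
--
-- def gcd(a, b):
--     a = abs(a)
--     b = abs(b)
--     if a * b == 0:
--         return max(a, b)
--     if b > a:
--         a,b = b,a
--     while b != 0:
--         q = a // b
--         a, b = b, a - b * q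
--     return a
--
-- def diophantine(a, b, c):
--     """Parameterizes all integer solutions to ax + by = c.
--
--     Returns x0, y0, dx, dy such that:
--         x0 + n * dx, y0 + n * dy
--     is a solution for all n, with x0 non-negative for n >= 0 and minimal for n = 0.
--
--     If there are no solutions, returns None.
--     """
--     g = gcd(a, b)
--     if c % g != 0:
--         return None
--
--     if a < b:
--         x0, y0, dx, dy = diophantine(b, a, c)
--         return y0, x0, dy, dx
--
--     if g != 1:
--         a //= g
--         b //= g
--         c //= g
--     x0, y0 = euclid(max(a,b), min(a,b), c)
--     dx = b
--     dy = -a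
--     n0 = -(x0 // dx)
--     x0, y0 = x0 + n0 * dx, y0 + n0 * dy
--     return x0, y0, dx, dy
-- ===== SOURCE B (Python) =====
-- def extgcd(a, b):
--     """Iterative extended Euclid: returns (g, s, t) with a*s + b*t = g = |gcd(a,b)|."""
--     old_r, r = a, b
--     old_s, s = 1, 0
--     old_t, t = 0, 1
--     while r != 0:
--         q = old_r // r
--         old_r, r = r, old_r - q * r
--         old_s, s = s, old_s - q * s
--         old_t, t = t, old_t - q * t
--     if old_r < 0:
--         return -old_r, -old_s, -old_t
--     return old_r, old_s, old_t
--
-- def diophantine(a, b, c):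
--     """Parameterizes all integer solutions to ax + by = c.
--
--     Returns x0, y0, dx, dy such that:
--         x0 + n * dx, y0 + n * dy
--     is a solution for all n, with x0 non-negative for n >= 0 and minimal for n = 0.
--
--     If there are no solutions, returns None.
--     """
--     if a < b:
--         res = diophantine(b, a, c)
--         if res is None:
--             return None
--         x0, y0, dx, dy = res
--         return y0, x0, dy, dx
--     g, s, t = extgcd(a, b)
--     if c % g != 0:
--         return None
--     a, b, c = a // g, b // g, c // g
--     x0 = (s * c) % b
--     y0 = (c - a * x0) // b
--     return x0, y0, b, -a
-- ===== Notes on version B (the rewrite author's own statement) =====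
-- stated objective: simpler
-- what changed: A's separate recursive extended-Euclid helper (`euclid`) and hand-written iterative `gcd` loop are replaced by a single iterative extended Euclidean loop returning (g, s, t) with a*s+b*t=g, and the normalized particular solution is computed directly as x0 = (s*c') % b' with y0 recovered by exact division, instead of A's solve-then-shift normalization n0 = -(x0 // dx).
import Mathlib
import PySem

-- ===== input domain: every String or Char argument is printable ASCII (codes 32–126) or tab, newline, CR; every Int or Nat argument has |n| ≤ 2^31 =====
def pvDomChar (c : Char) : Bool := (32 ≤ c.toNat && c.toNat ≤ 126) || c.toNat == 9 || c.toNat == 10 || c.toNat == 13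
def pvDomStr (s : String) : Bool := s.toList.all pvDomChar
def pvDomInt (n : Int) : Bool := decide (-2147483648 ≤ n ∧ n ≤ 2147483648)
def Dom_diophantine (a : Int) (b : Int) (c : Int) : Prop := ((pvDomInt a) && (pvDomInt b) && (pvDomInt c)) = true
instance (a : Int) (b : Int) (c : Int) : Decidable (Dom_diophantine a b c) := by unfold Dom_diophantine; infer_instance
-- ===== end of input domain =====

-- B replaces A's recursive `euclid` plus separate iterative `gcd` by a single iterative extended
-- Euclidean loop and a directly normalized particular solution (x0 = s*c' mod dx); objective: simpler.

-- ===== PORT A =====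

-- termination bound for the Euclid steps (the remainder shrinks in absolute value)
lemma pv_natAbs_fmod_lt (a b : Int) (hb : b ≠ 0) : (Int.fmod a b).natAbs < b.natAbs := by
  have h1 := Int.emod_nonneg a hb
  have h2 : a % b < (b.natAbs : Int) := Int.emod_lt a hb
  rw [Int.fmod_eq_emod]
  split_ifs with hi
  · omega
  · have hbneg : b < 0 := by
      by_contra hx
      exact hi (Or.inl (by omega))
    have hne : a % b ≠ 0 := fun h => hi (Or.inr (Int.dvd_of_emod_eq_zero h))
    omega


-- A's helper `euclid` (recursive extended Euclid on the remainder sequence)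
def euclidA (a : Int) (b : Int) (c : Int) : Int × Int :=
  if b = 0 then (PySem.Int.floordiv c a, 0)
  else
    let q := PySem.Int.floordiv a b
    let r := a - b * q
    let p := euclidA b r c
    (p.2, p.1 - q * p.2)
termination_by b.natAbs
decreasing_by
  have hb : ¬ b = 0 := by assumption
  show (a - b * Int.fdiv a b).natAbs < b.natAbs
  rw [← Int.fmod_def]
  exact pv_natAbs_fmod_lt a b (by assumption)

-- the `while b != 0` loop of A's `gcd`
def gcdLoopA (a : Int) (b : Int) : Int :=
  if b = 0 then a
  else
    let q := PySem.Int.floordiv a b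
    gcdLoopA b (a - b * q)
termination_by b.natAbs
decreasing_by
  have hb : ¬ b = 0 := by assumption
  show (a - b * Int.fdiv a b).natAbs < b.natAbs
  rw [← Int.fmod_def]
  exact pv_natAbs_fmod_lt a b (by assumption)

-- A's helper `gcd`
def gcdA (a : Int) (b : Int) : Int :=
  let a := |a|
  let b := |b|
  if a * b = 0 then max a b
  else
    let ab := if b > a then (b, a) else (a, b)
    gcdLoopA ab.1 ab.2

def diophantine (a : Int) (b : Int) (c : Int) : Option (Int × Int × Int × Int) :=
  let g := gcdA a b
  if PySem.Int.mod c g ≠ 0 then none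
  else if a < b then
    match diophantine b a c with
    | some (x0, y0, dx, dy) => some (y0, x0, dy, dx)
    | none => none   -- unreachable: the divisibility test above already passed, so the inner call returns a tuple
  else
    let red := if g ≠ 1 then (PySem.Int.floordiv a g, PySem.Int.floordiv b g, PySem.Int.floordiv c g)
               else (a, b, c)
    let p := euclidA (max red.1 red.2.1) (min red.1 red.2.1) red.2.2
    let dx := red.2.1
    let dy := -red.1
    let n0 := -(PySem.Int.floordiv p.1 dx)
    some (p.1 + n0 * dx, p.2 + n0 * dy, dx, dy)
termination_by ((if a < b then 1 else 0 : Nat))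
decreasing_by
  split_ifs <;> omega

-- ===== PORT B =====

-- the `while r != 0` loop of B's `extgcd`
def extgcdLoop (oldr : Int) (r : Int) (olds : Int) (s : Int) (oldt : Int) (t : Int) :
    Int × Int × Int :=
  if r = 0 then (oldr, olds, oldt)
  else
    let q := PySem.Int.floordiv oldr r
    extgcdLoop r (oldr - q * r) s (olds - q * s) t (oldt - q * t)
termination_by r.natAbs
decreasing_by
  have hr : ¬ r = 0 := by assumption
  show (oldr - Int.fdiv oldr r * r).natAbs < r.natAbs
  rw [show oldr - Int.fdiv oldr r * r = Int.fmod oldr r by rw [Int.fmod_def]; ring]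
  exact pv_natAbs_fmod_lt oldr r (by assumption)

-- B's `extgcd`: returns (g, s, t) with a*s + b*t = g = |gcd(a,b)|
def extgcd (a : Int) (b : Int) : Int × Int × Int :=
  let z := extgcdLoop a b 1 0 0 1
  if z.1 < 0 then (-z.1, -z.2.1, -z.2.2) else z

def diophantine_alt (a : Int) (b : Int) (c : Int) : Option (Int × Int × Int × Int) :=
  if a < b then
    match diophantine_alt b a c with
    | some (x0, y0, dx, dy) => some (y0, x0, dy, dx)
    | none => none
  else
    let gst := extgcd a b
    let g := gst.1
    let s := gst.2.1
    if PySem.Int.mod c g ≠ 0 then none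
    else
      let a' := PySem.Int.floordiv a g
      let b' := PySem.Int.floordiv b g
      let c' := PySem.Int.floordiv c g
      let x0 := PySem.Int.mod (s * c') b'
      let y0 := PySem.Int.floordiv (c' - a' * x0) b'
      some (x0, y0, b', -a')
termination_by ((if a < b then 1 else 0 : Nat))
decreasing_by
  split_ifs <;> omega

-- ===== PRECONDITION & SPEC =====
-- Pre_ excludes exactly the inputs where Python A raises ZeroDivisionError: a = b = 0 (c % 0),
-- and the solvable degenerate cases (b = 0 with a > 0, or a = 0 with b > 0, divisibility holding)
-- whose direction dx is 0, so that `n0 = -(x0 // dx)` divides by zero.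
def Pre_diophantine (a : Int) (b : Int) (c : Int) : Prop :=
  ¬(a = 0 ∧ b = 0) ∧ (b = 0 ∧ 0 < a → c % a ≠ 0) ∧ (a = 0 ∧ 0 < b → c % b ≠ 0)
instance (a : Int) (b : Int) (c : Int) : Decidable (Pre_diophantine a b c) := by
  unfold Pre_diophantine; infer_instance
def pvWitness_diophantine : Int × Int × Int := (2, 3, 5)

def Spec_diophantine (a : Int) (b : Int) (c : Int) (out : Option (Int × Int × Int × Int)) : Prop :=
  out = diophantine_alt a b c
instance (a : Int) (b : Int) (c : Int) (out : Option (Int × Int × Int × Int)) :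
    Decidable (Spec_diophantine a b c out) := by unfold Spec_diophantine; infer_instance

-- ===== CLAIM (what is proved, stated in full; the proofs are below) =====
def Claim_equal_diophantine : Prop := ∀ (a : Int) (b : Int) (c : Int), Dom_diophantine a b c →
  Pre_diophantine a b c → Spec_diophantine a b c (diophantine a b c)

-- ===== LEMMAS AND PROOFS =====

lemma floordiv_def : PySem.Int.floordiv = Int.fdiv := rfl
lemma mod_def : PySem.Int.mod = Int.fmod := rfl

-- gcd is invariant under one Euclid step
lemma gcd_step (a b q : Int) : Int.gcd b (a - b * q) = Int.gcd a b := by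
  rw [show a - b * q = a + (-q) * b by ring, Int.gcd_add_mul_right_right, Int.gcd_comm]

lemma gcd_abs (a b : Int) : Int.gcd |a| |b| = Int.gcd a b := by
  simp [Int.gcd, Int.natAbs_abs]

-- A's euclid returns a solution of a*x + b*y = c whenever gcd(a,b) | c
lemma euclidA_sol (a b c : Int) (h : (Int.gcd a b : Int) ∣ c) :
    a * (euclidA a b c).1 + b * (euclidA a b c).2 = c := by
  rw [euclidA.eq_def]
  split
  · rename_i hb
    subst hb
    have ha : a ∣ c := by
      rw [Int.gcd_zero_right] at h
      exact Int.natAbs_dvd.mp h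
    simpa [floordiv_def] using Int.mul_fdiv_cancel' ha
  · rename_i hb
    have hrec := euclidA_sol b (a - b * PySem.Int.floordiv a b) c
      (by rw [gcd_step]; exact h)
    simp only []
    linear_combination hrec
termination_by b.natAbs
decreasing_by
  show (a - b * Int.fdiv a b).natAbs < b.natAbs
  rw [← Int.fmod_def]
  exact pv_natAbs_fmod_lt a b (by assumption)

-- A's gcd loop computes Int.gcd on nonnegative inputs
lemma gcdLoopA_eq (a b : Int) (ha : 0 ≤ a) (hb : 0 ≤ b) :
    gcdLoopA a b = ((Int.gcd a b : Nat) : Int) := by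
  rw [gcdLoopA.eq_def]
  split
  · rename_i h0
    subst h0
    rw [Int.gcd_zero_right, Int.natAbs_of_nonneg ha]
  · rename_i h0
    have hbpos : (0:Int) < b := lt_of_le_of_ne hb (Ne.symm h0)
    have hmod : a - b * PySem.Int.floordiv a b = Int.fmod a b := by
      rw [floordiv_def, Int.fmod_def]
    have hnn : 0 ≤ a - b * PySem.Int.floordiv a b := by
      rw [hmod, Int.fmod_eq_emod]
      split_ifs with hi
      · have := Int.emod_nonneg a h0
        omega
      · exact absurd (Or.inl hb) hi
    have hrec := gcdLoopA_eq b (a - b * PySem.Int.floordiv a b) hb hnn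
    simp only []
    rw [hrec, floordiv_def, gcd_step]
termination_by b.natAbs
decreasing_by
  show (a - b * Int.fdiv a b).natAbs < b.natAbs
  rw [← Int.fmod_def]
  exact pv_natAbs_fmod_lt a b (by assumption)

-- A's gcd computes Int.gcd on all inputs
lemma gcdA_eq (a b : Int) : gcdA a b = ((Int.gcd a b : Nat) : Int) := by
  simp only [gcdA]
  split
  · rename_i h
    rcases mul_eq_zero.mp h with h' | h'
    · have ha0 : a = 0 := abs_eq_zero.mp h'
      subst ha0
      rw [Int.gcd_zero_left, abs_zero, max_eq_right (abs_nonneg b)]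
      exact Int.abs_eq_natAbs b
    · have hb0 : b = 0 := abs_eq_zero.mp h'
      subst hb0
      rw [Int.gcd_zero_right, abs_zero, max_eq_left (abs_nonneg a)]
      exact Int.abs_eq_natAbs a
  · split_ifs with hgt
    · rw [gcdLoopA_eq _ _ (abs_nonneg b) (abs_nonneg a)]
      rw [Int.gcd_comm, gcd_abs]
    · rw [gcdLoopA_eq _ _ (abs_nonneg a) (abs_nonneg b)]
      rw [gcd_abs]

-- B's loop invariant: Bézout coefficients and the gcd of the pair
lemma extgcdLoop_spec (a b oldr r olds s oldt t : Int)
    (h1 : a * olds + b * oldt = oldr) (h2 : a * s + b * t = r) :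
    a * (extgcdLoop oldr r olds s oldt t).2.1 + b * (extgcdLoop oldr r olds s oldt t).2.2
        = (extgcdLoop oldr r olds s oldt t).1
      ∧ (extgcdLoop oldr r olds s oldt t).1.natAbs = Int.gcd oldr r := by
  rw [extgcdLoop.eq_def]
  split
  · rename_i h0
    subst h0
    exact ⟨h1, by rw [Int.gcd_zero_right]⟩
  · rename_i h0
    have hrec := extgcdLoop_spec a b r (oldr - PySem.Int.floordiv oldr r * r)
      s (olds - PySem.Int.floordiv oldr r * s) t (oldt - PySem.Int.floordiv oldr r * t)
      h2 (by linear_combination h1 - (PySem.Int.floordiv oldr r) * h2)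
    simp only []
    refine ⟨hrec.1, ?_⟩
    rw [hrec.2,
      show oldr - PySem.Int.floordiv oldr r * r = oldr - r * PySem.Int.floordiv oldr r by ring,
      gcd_step]
termination_by r.natAbs
decreasing_by
  show (oldr - Int.fdiv oldr r * r).natAbs < r.natAbs
  rw [show oldr - Int.fdiv oldr r * r = Int.fmod oldr r by rw [Int.fmod_def]; ring]
  exact pv_natAbs_fmod_lt oldr r (by assumption)

lemma extgcd_spec (a b : Int) :
    (extgcd a b).1 = ((Int.gcd a b : Nat) : Int) ∧
    a * (extgcd a b).2.1 + b * (extgcd a b).2.2 = (extgcd a b).1 := by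
  have h := extgcdLoop_spec a b a b 1 0 0 1 (by ring) (by ring)
  simp only [extgcd]
  split_ifs with hneg
  · refine ⟨?_, by simp only []; linear_combination -h.1⟩
    simp only []
    rw [← h.2, Int.ofNat_natAbs_of_nonpos (le_of_lt hneg)]
  · refine ⟨?_, h.1⟩
    rw [← h.2, Int.natAbs_of_nonneg (not_lt.mp hneg)]

-- fmod only depends on the residue class
lemma fmod_congr {x y b : Int} (h : b ∣ x - y) : Int.fmod x b = Int.fmod y b := by
  obtain ⟨k, hk⟩ := h
  rw [show x = y + b * k by linarith, Int.add_mul_fmod_self_left]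

-- the two programs agree on the no-swap branch
lemma branch_eq (a b c : Int) (hba : ¬ a < b) (_h0 : ¬(a = 0 ∧ b = 0))
    (hd : b = 0 → ¬ ((Int.gcd a b : Int) ∣ c)) :
    diophantine a b c = diophantine_alt a b c := by
  by_cases hdvd : ((Int.gcd a b : Int)) ∣ c
  · have hb0 : b ≠ 0 := fun hb => hd hb hdvd
    have hG0 : Int.gcd a b ≠ 0 := fun h => hb0 (Int.gcd_eq_zero_iff.mp h).2
    have hGpos : (0:Int) < ((Int.gcd a b : Nat) : Int) := by
      exact_mod_cast Nat.pos_of_ne_zero hG0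
    have hga : ((Int.gcd a b : Nat) : Int) ∣ a := Int.gcd_dvd_left a b
    have hgb : ((Int.gcd a b : Nat) : Int) ∣ b := Int.gcd_dvd_right a b
    set G : Int := ((Int.gcd a b : Nat) : Int) with hGdef
    set a1 := Int.fdiv a G with ha1def
    set b1 := Int.fdiv b G with hb1def
    set c1 := Int.fdiv c G with hc1def
    have ha1 : a1 * G = a := Int.fdiv_mul_cancel hga
    have hb1 : b1 * G = b := Int.fdiv_mul_cancel hgb
    have hc1 : c1 * G = c := Int.fdiv_mul_cancel hdvd
    have hb1ne : b1 ≠ 0 := fun h => hb0 (by rw [← hb1, h, zero_mul])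
    have hord : b1 ≤ a1 := by
      have hmul : b1 * G ≤ a1 * G := by rw [ha1, hb1]; omega
      exact le_of_mul_le_mul_right hmul hGpos
    have hcop : Int.gcd a1 b1 = 1 := by
      have h := Int.gcd_div_gcd_div_gcd (i := a) (j := b) (Nat.pos_of_ne_zero hG0)
      rwa [ha1def, hb1def, Int.fdiv_eq_ediv_of_dvd hga, Int.fdiv_eq_ediv_of_dvd hgb]
    set s := (extgcd a b).2.1 with hsdef
    set t := (extgcd a b).2.2 with htdef
    have hbz : a * s + b * t = G := by
      rw [hGdef, ← (extgcd_spec a b).1]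
      exact (extgcd_spec a b).2
    have hbzred : a1 * s + b1 * t = 1 := by
      have h2 : (a1 * s + b1 * t) * G = 1 * G := by
        linear_combination s * ha1 + t * hb1 + hbz
      exact mul_right_cancel₀ (ne_of_gt hGpos) h2
    set x := (euclidA a1 b1 c1).1 with hxdef
    set y := (euclidA a1 b1 c1).2 with hydef
    have hxy : a1 * x + b1 * y = c1 := by
      apply euclidA_sol
      rw [hcop]
      simp
    have hcop' : IsCoprime b1 a1 := (Int.isCoprime_iff_gcd_eq_one.mpr hcop).symm
    have hdx : b1 ∣ x - s * c1 := by
      apply hcop'.dvd_of_dvd_mul_left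
      exact ⟨c1 * t - y, by linear_combination hxy - c1 * hbzred⟩
    have hx0 : Int.fmod x b1 = Int.fmod (s * c1) b1 := fmod_congr hdx
    have hmodA : PySem.Int.mod c (gcdA a b) = 0 := by
      rw [gcdA_eq, PySem.Int.mod_eq_zero_iff_dvd]; exact hdvd
    have hmodB : PySem.Int.mod c (extgcd a b).1 = 0 := by
      rw [(extgcd_spec a b).1, PySem.Int.mod_eq_zero_iff_dvd]; exact hdvd
    have hA : diophantine a b c =
        some (x + -(Int.fdiv x b1) * b1, y + -(Int.fdiv x b1) * -a1, b1, -a1) := by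
      conv_lhs => rw [diophantine.eq_def]
      simp only []
      rw [if_neg (not_not_intro hmodA), if_neg hba]
      rw [gcdA_eq, ← hGdef]
      have hred : (if G ≠ 1 then
            (PySem.Int.floordiv a G, PySem.Int.floordiv b G, PySem.Int.floordiv c G)
          else (a, b, c)) = (a1, b1, c1) := by
        by_cases h1 : G = 1
        · rw [if_neg (not_not_intro h1), ha1def, hb1def, hc1def, h1]
          simp [Int.fdiv_one]
        · rw [if_pos h1, floordiv_def]
      rw [hred]
      rw [max_eq_left hord, min_eq_right hord, floordiv_def]
    have hB : diophantine_alt a b c =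
        some (Int.fmod (s * c1) b1, Int.fdiv (c1 - a1 * Int.fmod (s * c1) b1) b1, b1, -a1) := by
      conv_lhs => rw [diophantine_alt.eq_def]
      simp only []
      rw [if_neg hba, if_neg (not_not_intro hmodB)]
      rw [(extgcd_spec a b).1, ← hGdef, floordiv_def, mod_def]
    rw [hA, hB]
    have hxval : x + -(Int.fdiv x b1) * b1 = Int.fmod (s * c1) b1 := by
      rw [← hx0, Int.fmod_def]; ring
    rw [← hxval]
    have e2 : c1 - a1 * (x + -(Int.fdiv x b1) * b1) = b1 * (y + -(Int.fdiv x b1) * -a1) := by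
      linear_combination -hxy
    rw [e2, Int.mul_fdiv_cancel_left _ hb1ne]
  · have hmodA : PySem.Int.mod c (gcdA a b) ≠ 0 := by
      simp only [gcdA_eq, Ne, PySem.Int.mod_eq_zero_iff_dvd]
      exact hdvd
    have hmodB : PySem.Int.mod c (extgcd a b).1 ≠ 0 := by
      simp only [(extgcd_spec a b).1, Ne, PySem.Int.mod_eq_zero_iff_dvd]
      exact hdvd
    conv_lhs => rw [diophantine.eq_def]
    conv_rhs => rw [diophantine_alt.eq_def]
    simp only []
    rw [if_pos hmodA, if_neg hba, if_pos hmodB]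

-- on divisibility by gcd with one argument zero
lemma dvd_emod_zero {b c : Int} (h : b ∣ c) : c % b = 0 :=
  Int.emod_eq_zero_of_dvd h

-- ===== VERDICT (by name: the statement is the Claim_ definition above) =====
theorem diophantine_spec : Claim_equal_diophantine := by
  intro a b c _dom hpre
  obtain ⟨h00, hbz, haz⟩ := hpre
  unfold Spec_diophantine
  by_cases hlt : a < b
  · have hinner : diophantine b a c = diophantine_alt b a c := by
      apply branch_eq b a c (by omega) (by tauto)
      intro ha0 hdvd
      have hbpos : 0 < b := by omega
      apply haz ⟨ha0, hbpos⟩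
      subst ha0
      rw [Int.gcd_zero_right] at hdvd
      exact dvd_emod_zero (Int.natAbs_dvd.mp hdvd)
    conv_rhs => rw [diophantine_alt.eq_def]
    rw [if_pos hlt, ← hinner]
    conv_lhs => rw [diophantine.eq_def]
    simp only []
    rw [gcdA_eq]
    by_cases hm : PySem.Int.mod c ((Int.gcd a b : Nat) : Int) = 0
    · rw [if_neg (not_not_intro hm), if_pos hlt]
    · rw [if_pos hm]
      have hnone : diophantine b a c = none := by
        conv_lhs => rw [diophantine.eq_def]
        simp only []
        rw [gcdA_eq, Int.gcd_comm b a, if_pos hm]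
      rw [hnone]
  · apply branch_eq a b c hlt h00
    intro hb00 hdvd
    have hapos : 0 < a := by
      rcases lt_trichotomy a 0 with h | h | h
      · omega
      · exact absurd ⟨h, hb00⟩ h00
      · exact h
    apply hbz ⟨hb00, hapos⟩
    subst hb00
    rw [Int.gcd_zero_right] at hdvd
    exact dvd_emod_zero (Int.natAbs_dvd.mp hdvd)
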